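-- pv_equiv track=rewrite | github.com/ademirzanchettajr/controle-bolao | src/utils/relatorio.py | calcular_variacao_posicao
-- ===== SOURCE A (Python) =====
-- from typing import List, Dict, Optional, Any
--
-- def calcular_variacao_posicao(participante: str, posicao_atual: int,
--                              historico_posicoes: Dict[str, Dict[int, int]]) -> int:
--     """
--     Calcula variação de posição de um participante em relação à rodada anterior.
--
--     Args:
--         participante: Nome do participante
--         posicao_atual: Posição atual do participante
--         historico_posicoes: Dicionário com histórico de posições por rodada
--                            Formato: {participante: {rodada: posicao}}
--
--     Returns:
--         Variação de posição (positivo = subiu, negativo = desceu, 0 = manteve)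
--     """
--     if participante not in historico_posicoes:
--         return 0
--
--     posicoes_participante = historico_posicoes[participante]
--
--     if not posicoes_participante:
--         return 0
--
--     # Encontra a rodada anterior mais recente
--     rodadas_anteriores = [r for r in posicoes_participante.keys() if r < max(posicoes_participante.keys())]
--
--     if not rodadas_anteriores:
--         return 0
--
--     rodada_anterior = max(rodadas_anteriores)
--     posicao_anterior = posicoes_participante[rodada_anterior]
--
--     # Variação é negativa quando sobe (posição menor é melhor)
--     return posicao_anterior - posicao_atual
-- ===== SOURCE B (Python) =====
-- def calcular_variacao_posicao(participante, posicao_atual, historico_posicoes):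
--     """Single pass over the participant's history tracking the largest and
--     second-largest round (with its position)."""
--     posicoes = historico_posicoes.get(participante)
--     if posicoes is None:
--         return 0
--     melhor = None    # (rodada, posicao) with the largest rodada so far
--     segundo = None   # (rodada, posicao) with the largest rodada below melhor's
--     for rodada, posicao in posicoes.items():
--         if melhor is None or rodada > melhor[0]:
--             melhor, segundo = (rodada, posicao), melhor
--         elif rodada < melhor[0] and (segundo is None or rodada > segundo[0]):
--             segundo = (rodada, posicao)
--     if segundo is None:
--         return 0
--     return segundo[1] - posicao_atual
-- ===== Notes on version B (the rewrite author's own statement) =====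
-- stated objective: alternative
-- what changed: Replaces the comprehension that recomputes max(keys) for every key and the second max() pass with one linear scan of the participant's rounds that tracks the largest and second-largest round together with its position.
import Mathlib
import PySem

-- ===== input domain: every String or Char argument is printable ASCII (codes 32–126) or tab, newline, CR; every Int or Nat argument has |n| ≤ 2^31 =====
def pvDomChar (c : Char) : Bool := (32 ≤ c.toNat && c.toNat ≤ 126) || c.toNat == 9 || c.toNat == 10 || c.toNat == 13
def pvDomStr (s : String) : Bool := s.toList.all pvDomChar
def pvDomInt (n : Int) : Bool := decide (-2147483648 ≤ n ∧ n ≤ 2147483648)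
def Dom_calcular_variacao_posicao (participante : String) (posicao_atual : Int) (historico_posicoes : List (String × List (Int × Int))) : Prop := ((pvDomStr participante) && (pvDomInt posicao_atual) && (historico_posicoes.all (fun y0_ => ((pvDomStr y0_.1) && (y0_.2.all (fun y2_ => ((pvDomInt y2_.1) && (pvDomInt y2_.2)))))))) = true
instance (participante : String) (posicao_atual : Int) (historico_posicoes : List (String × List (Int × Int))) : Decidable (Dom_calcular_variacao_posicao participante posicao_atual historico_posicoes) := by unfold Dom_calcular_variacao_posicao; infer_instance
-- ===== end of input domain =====

-- B replaces A's "filter keys below max(keys), then max again" with one linear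
-- scan tracking the largest and second-largest round (with its position).


-- ===== PORT A =====
-- body of A after the membership check: empty-dict test, the comprehension
-- [r for r in keys if r < max(keys)], max of it, lookup, subtraction
def pvACore (d : PySem.Dict Int Int) (posicao_atual : Int) : Int :=
  if d.size = 0 then 0
  else
    match PySem.List.max? d.keys (fun r => r) with
    | none => 0      -- unreachable guard: max(keys) on a nonempty dict
    | some m =>
      match PySem.List.max? (d.keys.filter (fun r => decide (r < m))) (fun r => r) with
      | none => 0
      | some ra => d.getD ra 0 - posicao_atual

def calcular_variacao_posicao (participante : String) (posicao_atual : Int) (historico_posicoes : List (String × List (Int × Int))) : Int :=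
  if (PySem.Dict.ofList historico_posicoes).contains participante = false then 0
  else
    pvACore (PySem.Dict.ofList ((PySem.Dict.ofList historico_posicoes).getD participante [])) posicao_atual

-- ===== PORT B =====
-- one loop step of B: state = (melhor, segundo), each an optional (rodada, posicao)
def pvStep (st : Option (Int × Int) × Option (Int × Int)) (rp : Int × Int) : Option (Int × Int) × Option (Int × Int) :=
  match st with
  | (none, s) => (some rp, s)
  | (some b, s) =>
    if b.1 < rp.1 then (some rp, some b)
    else if rp.1 < b.1 then
      match s with
      | none => (some b, some rp)
      | some sb => if sb.1 < rp.1 then (some b, some rp) else (some b, some sb)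
    else (some b, s)

def pvBCore (d : PySem.Dict Int Int) (posicao_atual : Int) : Int :=
  match (d.items.foldl pvStep (none, none)).2 with
  | none => 0
  | some sb => sb.2 - posicao_atual

def calcular_variacao_posicao_alt (participante : String) (posicao_atual : Int) (historico_posicoes : List (String × List (Int × Int))) : Int :=
  match (PySem.Dict.ofList historico_posicoes).get? participante with
  | none => 0
  | some l => pvBCore (PySem.Dict.ofList l) posicao_atual

-- ===== PRECONDITION & SPEC =====
def Spec_calcular_variacao_posicao (participante : String) (posicao_atual : Int) (historico_posicoes : List (String × List (Int × Int))) (out : Int) : Prop := out = calcular_variacao_posicao_alt participante posicao_atual historico_posicoes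
instance (participante : String) (posicao_atual : Int) (historico_posicoes : List (String × List (Int × Int))) (out : Int) : Decidable (Spec_calcular_variacao_posicao participante posicao_atual historico_posicoes out) := by unfold Spec_calcular_variacao_posicao; infer_instance

-- ===== CLAIM (what is proved, stated in full; the proofs are below) =====
def Claim_equal_calcular_variacao_posicao : Prop := ∀ (participante : String) (posicao_atual : Int) (historico_posicoes : List (String × List (Int × Int))), Dom_calcular_variacao_posicao participante posicao_atual historico_posicoes → Spec_calcular_variacao_posicao participante posicao_atual historico_posicoes (calcular_variacao_posicao participante posicao_atual historico_posicoes)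

-- ===== LEMMAS AND PROOFS =====

-- invariant of B's fold over the processed prefix l:
-- first component = an entry with maximal rodada, second = entry with maximal rodada strictly below it
def pvGood (l : List (Int × Int)) (st : Option (Int × Int) × Option (Int × Int)) : Prop :=
  match st with
  | (none, s) => l = [] ∧ s = none
  | (some b, s) =>
    b ∈ l ∧ (∀ p ∈ l, p.1 ≤ b.1) ∧
    match s with
    | none => ∀ p ∈ l, ¬ p.1 < b.1
    | some sb => sb ∈ l ∧ sb.1 < b.1 ∧ ∀ p ∈ l, p.1 < b.1 → p.1 ≤ sb.1

lemma pvGood_step (l : List (Int × Int)) (st : Option (Int × Int) × Option (Int × Int))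
    (x : Int × Int) (h : pvGood l st) : pvGood (l ++ [x]) (pvStep st x) := by
  obtain ⟨b?, s?⟩ := st
  cases b? with
  | none =>
    obtain ⟨hl, hs⟩ := h
    subst hl; subst hs
    simp [pvStep, pvGood]
  | some b =>
    obtain ⟨hb, hmax, hs⟩ := h
    by_cases h1 : b.1 < x.1
    · simp only [pvStep, if_pos h1, pvGood]
      refine ⟨by simp, ?_, by simp [hb], h1, ?_⟩
      · intro p hp
        rcases List.mem_append.mp hp with hp | hp
        · exact le_of_lt (lt_of_le_of_lt (hmax p hp) h1)
        · simp_all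
      · intro p hp _
        rcases List.mem_append.mp hp with hp | hp
        · exact hmax p hp
        · simp_all
    · by_cases h2 : x.1 < b.1
      · cases s? with
        | none =>
          simp only [pvStep, if_neg h1, if_pos h2, pvGood]
          refine ⟨by simp [hb], ?_, by simp, h2, ?_⟩
          · intro p hp
            rcases List.mem_append.mp hp with hp | hp
            · exact hmax p hp
            · simp_all
          · intro p hp hlt
            rcases List.mem_append.mp hp with hp | hp
            · exact absurd hlt (hs p hp)
            · simp_all
        | some sb =>
          obtain ⟨hsb, hsblt, hsbmax⟩ := hs
          by_cases h3 : sb.1 < x.1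
          · simp only [pvStep, if_neg h1, if_pos h2, if_pos h3, pvGood]
            refine ⟨by simp [hb], ?_, by simp, h2, ?_⟩
            · intro p hp
              rcases List.mem_append.mp hp with hp | hp
              · exact hmax p hp
              · simp_all
            · intro p hp hlt
              rcases List.mem_append.mp hp with hp | hp
              · exact le_of_lt (lt_of_le_of_lt (hsbmax p hp hlt) h3)
              · simp_all
          · simp only [pvStep, if_neg h1, if_pos h2, if_neg h3, pvGood]
            refine ⟨by simp [hb], ?_, by simp [hsb], hsblt, ?_⟩
            · intro p hp
              rcases List.mem_append.mp hp with hp | hp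
              · exact hmax p hp
              · simp_all
            · intro p hp hlt
              rcases List.mem_append.mp hp with hp | hp
              · exact hsbmax p hp hlt
              · simp_all
      · have hbeq : x.1 = b.1 := le_antisymm (not_lt.mp h1) (not_lt.mp h2)
        cases s? with
        | none =>
          simp only [pvStep, if_neg h1, if_neg h2, pvGood]
          refine ⟨by simp [hb], ?_, ?_⟩
          · intro p hp
            rcases List.mem_append.mp hp with hp | hp
            · exact hmax p hp
            · simp_all
          · intro p hp
            rcases List.mem_append.mp hp with hp | hp
            · exact hs p hp
            · simp_all
        | some sb =>
          obtain ⟨hsb, hsblt, hsbmax⟩ := hs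
          simp only [pvStep, if_neg h1, if_neg h2, pvGood]
          refine ⟨by simp [hb], ?_, by simp [hsb], hsblt, ?_⟩
          · intro p hp
            rcases List.mem_append.mp hp with hp | hp
            · exact hmax p hp
            · simp_all
          · intro p hp hlt
            rcases List.mem_append.mp hp with hp | hp
            · exact hsbmax p hp hlt
            · simp_all

lemma pvGood_foldl (l : List (Int × Int)) : pvGood l (l.foldl pvStep (none, none)) := by
  induction l using List.reverseRecOn with
  | nil => simp [pvGood]
  | append_singleton l x ih =>
    rw [List.foldl_append]
    exact pvGood_step l _ x ih

lemma pvCore_eq (d : PySem.Dict Int Int) (posicao_atual : Int) (hnd : d.keys.Nodup) :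
    pvACore d posicao_atual = pvBCore d posicao_atual := by
  have hkeys : d.keys = d.items.map Prod.fst := rfl
  have hsize : d.size = d.items.length := rfl
  have hg := pvGood_foldl d.items
  unfold pvACore pvBCore
  rcases hst : d.items.foldl pvStep (none, none) with ⟨b?, s?⟩
  rw [hst] at hg
  cases b? with
  | none =>
    obtain ⟨hl, hs⟩ := hg
    subst hs
    simp [hsize, hl]
  | some b =>
    obtain ⟨hb, hmax, hs⟩ := hg
    have hne : d.items ≠ [] := by intro h; rw [h] at hb; exact absurd hb (List.not_mem_nil)
    have hsz : ¬ d.size = 0 := by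
      rw [hsize]; simp [List.length_eq_zero_iff, hne]
    rw [if_neg hsz]
    -- max(keys) = b.1
    rcases hm : PySem.List.max? d.keys (fun r => r) with _ | m
    all_goals dsimp only
    · rw [PySem.List.max?_eq_none_iff] at hm
      rw [hkeys] at hm; simp at hm; exact absurd hm hne
    · have hmmem : m ∈ d.keys := PySem.List.max?_mem hm
      have hmmax : ∀ y ∈ d.keys, y ≤ m := PySem.List.max?_isMax hm
      have hbk : b.1 ∈ d.keys := by rw [hkeys]; exact List.mem_map_of_mem hb
      obtain ⟨p, hp, hpm⟩ := List.mem_map.mp (hkeys ▸ hmmem)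
      have hmb : m = b.1 := le_antisymm (hpm ▸ hmax p hp) (hmmax _ hbk)
      cases s? with
      | none =>
        have hfil : d.keys.filter (fun r => decide (r < m)) = [] := by
          rw [List.filter_eq_nil_iff]
          intro k hk
          obtain ⟨q, hq, hqk⟩ := List.mem_map.mp (hkeys ▸ hk)
          simp only [decide_eq_true_eq, not_lt]
          rw [← hqk, hmb]
          exact not_lt.mp (hs q hq)
        rw [hfil]
        simp [PySem.List.max?]
      | some sb =>
        obtain ⟨hsb, hsblt, hsbmax⟩ := hs
        have hsbk : sb.1 ∈ d.keys.filter (fun r => decide (r < m)) := by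
          rw [List.mem_filter]
          exact ⟨hkeys ▸ List.mem_map_of_mem hsb, by simp [hmb, hsblt]⟩
        rcases hra : PySem.List.max? (d.keys.filter (fun r => decide (r < m))) (fun r => r) with _ | ra
        all_goals dsimp only
        · rw [PySem.List.max?_eq_none_iff] at hra
          rw [hra] at hsbk; exact absurd hsbk (List.not_mem_nil)
        · have hramem := PySem.List.max?_mem hra
          have hramax := PySem.List.max?_isMax hra
          have h1 : sb.1 ≤ ra := hramax _ hsbk
          obtain ⟨hrak, hralt⟩ := List.mem_filter.mp hramem
          obtain ⟨q, hq, hqra⟩ := List.mem_map.mp (hkeys ▸ hrak)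
          have h2 : ra ≤ sb.1 := by
            have h3 := of_decide_eq_true hralt
            have h4 := hsbmax q hq (by omega)
            omega
          have hrasb : ra = sb.1 := le_antisymm h2 h1
          have : d.getD ra 0 = sb.2 := by
            rw [hrasb]
            exact PySem.Dict.getD_of_mem_items d (by rcases sb with ⟨a, c⟩; exact hsb) hnd 0
          rw [this]

-- ===== VERDICT (by name: the statement is the Claim_ definition above) =====
theorem calcular_variacao_posicao_spec : Claim_equal_calcular_variacao_posicao := by
  intro participante posicao_atual historico_posicoes _
  unfold Spec_calcular_variacao_posicao calcular_variacao_posicao calcular_variacao_posicao_alt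
  rw [PySem.Dict.contains_eq_isSome_get?]
  cases hg : (PySem.Dict.ofList historico_posicoes).get? participante with
  | none => simp
  | some l =>
    simp only [Option.isSome_some]
    rw [PySem.Dict.getD_eq_get?_getD, hg]
    simp only [Option.getD_some]
    rw [if_neg (by simp)]
    exact pvCore_eq _ posicao_atual (PySem.Dict.nodup_keys_ofList l)
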